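-- pv_equiv track=rewrite | github.com/raeez/chiral-bar-cobar | compute/lib/bps_wall_crossing_engine.py | joyce_song_primitive_wc
-- ===== SOURCE A (Python) =====
-- from typing import Any, Dict, FrozenSet, List, Optional, Sequence, Tuple
--
-- def euler_form(gamma1: Tuple[int, ...], gamma2: Tuple[int, ...]) -> int:
--     r"""Skew-symmetric Euler form on the charge lattice Z^r.
--
--     For r=2: <(a,b), (c,d)> = ad - bc  (standard symplectic form).
--     For general r: sum_{i<j} (gamma1[i]*gamma2[j] - gamma1[j]*gamma2[i]).
--     """
--     n = len(gamma1)
--     assert len(gamma2) == n, "Charge vectors must have equal dimension"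
--     if n == 2:
--         return gamma1[0] * gamma2[1] - gamma1[1] * gamma2[0]
--     total = 0
--     for i in range(n):
--         for j in range(i + 1, n):
--             total += gamma1[i] * gamma2[j] - gamma1[j] * gamma2[i]
--     return total
--
-- def charge_add(g1: Tuple[int, ...], g2: Tuple[int, ...]) -> Tuple[int, ...]:
--     """Add two charge vectors."""
--     return tuple(a + b for a, b in zip(g1, g2))
--
-- def joyce_song_primitive_wc(gamma: Tuple[int, ...],
--                             spectrum_below: List[Tuple[Tuple[int, ...], int]],
--                             spectrum_above: List[Tuple[Tuple[int, ...], int]]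
--                             ) -> int:
--     r"""Joyce-Song primitive wall-crossing formula.
--
--     For a decomposition gamma = gamma_1 + gamma_2 at a wall where
--     arg(Z(gamma_1)) = arg(Z(gamma_2)):
--
--         Delta_Omega(gamma) = (-1)^{<gamma_1,gamma_2>-1}
--                              * <gamma_1,gamma_2>
--                              * Omega(gamma_1) * Omega(gamma_2)
--
--     This is the Poisson bracket on the torus algebra.
--
--     Parameters
--     ----------
--     gamma : charge vector of the target state
--     spectrum_below : list of (charge, Omega) pairs on one side of the wall
--     spectrum_above : list of (charge, Omega) pairs on the other side
--
--     Returns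
--     -------
--     int : Delta_Omega(gamma) = change in BPS index
--     """
--     delta = 0
--     for g1, o1 in spectrum_below:
--         for g2, o2 in spectrum_above:
--             if charge_add(g1, g2) == gamma:
--                 ef = euler_form(g1, g2)
--                 # (-1)^n for integer n: use modular arithmetic to avoid float
--                 sign = 1 if (ef - 1) % 2 == 0 else -1
--                 delta += sign * ef * o1 * o2
--     return delta
-- ===== SOURCE B (Python) =====
-- def euler_form(gamma1, gamma2):
--     n = len(gamma1)
--     assert len(gamma2) == n, "Charge vectors must have equal dimension"
--     if n == 2:
--         return gamma1[0] * gamma2[1] - gamma1[1] * gamma2[0]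
--     total = 0
--     for i in range(n):
--         for j in range(i + 1, n):
--             total += gamma1[i] * gamma2[j] - gamma1[j] * gamma2[i]
--     return total
--
--
-- def joyce_song_primitive_wc(gamma, spectrum_below, spectrum_above):
--     # Hash the upper spectrum by charge, then a single pass over the lower
--     # spectrum looks up the unique complementary charge gamma - g1.
--     r = len(gamma)
--     totals = {}
--     for g2, o2 in spectrum_above:
--         totals[g2] = totals.get(g2, 0) + o2
--     delta = 0
--     for g1, o1 in spectrum_below:
--         if len(g1) != r:
--             continue
--         g2 = tuple(a - b for a, b in zip(gamma, g1))
--         o2 = totals.get(g2, 0)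
--         ef = euler_form(g1, g2)
--         sign = 1 if (ef - 1) % 2 == 0 else -1
--         delta += sign * ef * o1 * o2
--     return delta
-- ===== Notes on version B (the rewrite author's own statement) =====
-- stated objective: faster
-- what changed: Instead of scanning all N*M pairs of the two spectra, B sums the upper spectrum's Omegas into a dict keyed by charge and, for each lower charge g1, looks up the single complementary charge gamma-g1.
import Mathlib
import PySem

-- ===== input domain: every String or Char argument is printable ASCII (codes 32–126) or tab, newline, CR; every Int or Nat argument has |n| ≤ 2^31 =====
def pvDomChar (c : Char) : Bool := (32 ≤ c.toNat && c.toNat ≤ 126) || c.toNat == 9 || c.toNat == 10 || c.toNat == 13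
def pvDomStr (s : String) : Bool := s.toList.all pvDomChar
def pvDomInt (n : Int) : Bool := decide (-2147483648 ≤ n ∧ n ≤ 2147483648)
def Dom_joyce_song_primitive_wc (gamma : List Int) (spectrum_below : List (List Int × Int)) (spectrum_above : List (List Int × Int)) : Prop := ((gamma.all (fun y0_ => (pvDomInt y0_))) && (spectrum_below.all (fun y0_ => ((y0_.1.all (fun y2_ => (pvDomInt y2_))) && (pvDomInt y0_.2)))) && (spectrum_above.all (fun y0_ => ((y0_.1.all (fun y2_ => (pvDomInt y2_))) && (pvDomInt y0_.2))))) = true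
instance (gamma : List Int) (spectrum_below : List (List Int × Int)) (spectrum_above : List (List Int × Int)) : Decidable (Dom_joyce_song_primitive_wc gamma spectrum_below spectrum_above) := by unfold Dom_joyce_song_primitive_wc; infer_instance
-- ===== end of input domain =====

-- B replaces A's scan over all pairs (g1,g2) of the two spectra by a dict of summed
-- Omegas of the upper spectrum keyed by charge, looked up at the unique complement
-- gamma-g1 for each lower charge g1 (objective: faster, asymptotically fewer pair tests).

-- ===== PORT A =====
-- shared helper, transliterated from the module's euler_form (the assert is Python-exact
-- via Pre_; pyGetD with default 0 is exact here since every index produced is in range)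
def euler_form (g1 g2 : List Int) : Int :=
  let n : Int := g1.length
  if n = 2 then
    PySem.List.pyGetD g1 0 0 * PySem.List.pyGetD g2 1 0
      - PySem.List.pyGetD g1 1 0 * PySem.List.pyGetD g2 0 0
  else
    (PySem.List.pyRange 0 n 1).foldl (fun total i =>
      (PySem.List.pyRange (i + 1) n 1).foldl (fun total j =>
        total + (PySem.List.pyGetD g1 i 0 * PySem.List.pyGetD g2 j 0
                  - PySem.List.pyGetD g1 j 0 * PySem.List.pyGetD g2 i 0)) total) 0

-- charge_add: tuple(a+b for a,b in zip(g1,g2)) — zip truncates to the shorter list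
def charge_add (g1 g2 : List Int) : List Int := List.zipWith (· + ·) g1 g2

def joyce_song_primitive_wc (gamma : List Int) (spectrum_below : List (List Int × Int)) (spectrum_above : List (List Int × Int)) : Int :=
  spectrum_below.foldl (fun delta p =>
    spectrum_above.foldl (fun delta q =>
      if charge_add p.1 q.1 = gamma then
        let ef := euler_form p.1 q.1
        let sign : Int := if PySem.Int.mod (ef - 1) 2 = 0 then 1 else -1
        delta + sign * ef * p.2 * q.2
      else delta) delta) 0

-- ===== PORT B =====
def joyce_song_primitive_wc_alt (gamma : List Int) (spectrum_below : List (List Int × Int)) (spectrum_above : List (List Int × Int)) : Int :=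
  let r := gamma.length
  -- totals[g2] = totals.get(g2, 0) + o2
  let totals : PySem.Dict (List Int) Int :=
    spectrum_above.foldl (fun d q => d.modify q.1 0 (· + q.2)) PySem.Dict.empty
  spectrum_below.foldl (fun delta p =>
    if p.1.length = r then
      let g2 := List.zipWith (fun a b => a - b) gamma p.1
      let o2 := totals.getD g2 0
      let ef := euler_form p.1 g2
      let sign : Int := if PySem.Int.mod (ef - 1) 2 = 0 then 1 else -1
      delta + sign * ef * p.2 * o2
    else delta) 0

-- ===== PRECONDITION & SPEC =====
-- Pre_ excludes exactly the inputs where A raises: an AssertionError in euler_form fires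
-- precisely when some pair (g1,g2) of different dimensions has zip-truncated sum equal to gamma.
def Pre_joyce_song_primitive_wc (gamma : List Int) (spectrum_below : List (List Int × Int)) (spectrum_above : List (List Int × Int)) : Prop :=
  ∀ p ∈ spectrum_below, ∀ q ∈ spectrum_above,
    p.1.length = q.1.length ∨ List.zipWith (· + ·) p.1 q.1 ≠ gamma
instance (gamma : List Int) (spectrum_below : List (List Int × Int)) (spectrum_above : List (List Int × Int)) : Decidable (Pre_joyce_song_primitive_wc gamma spectrum_below spectrum_above) := by unfold Pre_joyce_song_primitive_wc; infer_instance

def pvWitness_joyce_song_primitive_wc : List Int × (List (List Int × Int)) × (List (List Int × Int)) :=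
  ([1, 1], [([1, 0], 2)], [([0, 1], 3)])

def Spec_joyce_song_primitive_wc (gamma : List Int) (spectrum_below : List (List Int × Int)) (spectrum_above : List (List Int × Int)) (out : Int) : Prop := out = joyce_song_primitive_wc_alt gamma spectrum_below spectrum_above
instance (gamma : List Int) (spectrum_below : List (List Int × Int)) (spectrum_above : List (List Int × Int)) (out : Int) : Decidable (Spec_joyce_song_primitive_wc gamma spectrum_below spectrum_above out) := by unfold Spec_joyce_song_primitive_wc; infer_instance

-- ===== CLAIM (what is proved, stated in full; the proofs are below) =====
def Claim_equal_joyce_song_primitive_wc : Prop := ∀ (gamma : List Int) (spectrum_below : List (List Int × Int)) (spectrum_above : List (List Int × Int)), Dom_joyce_song_primitive_wc gamma spectrum_below spectrum_above → Pre_joyce_song_primitive_wc gamma spectrum_below spectrum_above → Spec_joyce_song_primitive_wc gamma spectrum_below spectrum_above (joyce_song_primitive_wc gamma spectrum_below spectrum_above)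


-- ===== LEMMAS AND PROOFS =====

-- the common per-pair contribution (the let-body both ports share)
def wcTerm (g1 g2 : List Int) (o1 o2 : Int) : Int :=
  (if PySem.Int.mod (euler_form g1 g2 - 1) 2 = 0 then (1 : Int) else -1) * euler_form g1 g2 * o1 * o2

lemma foldl_if_add {α : Type} (l : List α) (p : α → Prop) [DecidablePred p] (f : α → Int) (a : Int) :
    l.foldl (fun a x => if p x then a + f x else a) a
      = a + (l.map (fun x => if p x then f x else 0)).sum := by
  induction l generalizing a with
  | nil => simp
  | cons x l ih =>
    simp only [List.foldl_cons, List.map_cons, List.sum_cons]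
    by_cases h : p x
    · simp only [if_pos h, ih]; ring
    · simp only [if_neg h, ih]; ring

lemma zipWith_sub_of_add {g1 g2 gamma : List Int}
    (hlen : g1.length = g2.length) (h : List.zipWith (· + ·) g1 g2 = gamma) :
    g2 = List.zipWith (fun a b => a - b) gamma g1 := by
  subst h
  induction g1 generalizing g2 with
  | nil =>
    cases g2 with
    | nil => rfl
    | cons b g2 => exact absurd hlen (by simp)
  | cons a g1 ih =>
    cases g2 with
    | nil => exact absurd hlen (by simp)
    | cons b g2 =>
      simp only [List.zipWith_cons_cons, List.cons.injEq]
      exact ⟨by ring, ih (by simpa using hlen)⟩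

lemma zipWith_add_sub {g1 gamma : List Int} (hlen : g1.length = gamma.length) :
    List.zipWith (· + ·) g1 (List.zipWith (fun a b => a - b) gamma g1) = gamma := by
  induction g1 generalizing gamma with
  | nil =>
    cases gamma with
    | nil => rfl
    | cons c gamma => exact absurd hlen (by simp)
  | cons a g1 ih =>
    cases gamma with
    | nil => exact absurd hlen (by simp)
    | cons c gamma =>
      simp only [List.zipWith_cons_cons, List.cons.injEq]
      exact ⟨by ring, ih (by simpa using hlen)⟩

lemma getD_foldl_modify_sum (l : List (List Int × Int)) (d : PySem.Dict (List Int) Int) (c : List Int) :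
    (l.foldl (fun d q => d.modify q.1 0 (· + q.2)) d).getD c 0
      = d.getD c 0 + (l.map (fun q => if q.1 = c then q.2 else 0)).sum := by
  induction l generalizing d with
  | nil => simp
  | cons q l ih =>
    simp only [List.foldl_cons, List.map_cons, List.sum_cons]
    rw [ih, PySem.Dict.getD_modify]
    by_cases h : c = q.1
    · subst h; rw [if_pos rfl, if_pos rfl]; ring
    · rw [if_neg h, if_neg (fun hh => h hh.symm)]; ring

lemma nested_foldl_eq (gamma : List Int) (sa sb : List (List Int × Int)) (a : Int) :
    sb.foldl (fun delta p => sa.foldl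
        (fun delta q => if charge_add p.1 q.1 = gamma then delta + wcTerm p.1 q.1 p.2 q.2 else delta)
        delta) a
      = a + (sb.map (fun p =>
          (sa.map (fun q => if charge_add p.1 q.1 = gamma then wcTerm p.1 q.1 p.2 q.2 else 0)).sum)).sum := by
  induction sb generalizing a with
  | nil => simp
  | cons p sb ih =>
    simp only [List.foldl_cons, List.map_cons, List.sum_cons]
    rw [foldl_if_add, ih]
    ring

-- the inner scan of A over spectrum_above collapses, under Pre_, to B's single lookup
lemma inner_sum_eq (gamma : List Int) (sa : List (List Int × Int)) (p : List Int × Int)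
    (hp : ∀ q ∈ sa, p.1.length = q.1.length ∨ List.zipWith (· + ·) p.1 q.1 ≠ gamma) :
    (sa.map (fun q => if charge_add p.1 q.1 = gamma then wcTerm p.1 q.1 p.2 q.2 else 0)).sum
      = if p.1.length = gamma.length then
          wcTerm p.1 (List.zipWith (fun a b => a - b) gamma p.1) p.2
            ((sa.map (fun q => if q.1 = (List.zipWith (fun a b => a - b) gamma p.1) then q.2 else 0)).sum)
        else 0 := by
  by_cases hr : p.1.length = gamma.length
  · simp only [hr, if_pos]
    set c := List.zipWith (fun a b => a - b) gamma p.1 with hc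
    have hmatch : ∀ q ∈ sa, (charge_add p.1 q.1 = gamma) ↔ q.1 = c := by
      intro q hq
      constructor
      · intro h
        rcases hp q hq with hlen | hne
        · exact zipWith_sub_of_add hlen h
        · exact absurd h hne
      · intro h
        rw [h, hc]
        exact zipWith_add_sub hr
    have : (sa.map (fun q => if charge_add p.1 q.1 = gamma then wcTerm p.1 q.1 p.2 q.2 else 0))
         = (sa.map (fun q => if q.1 = c then wcTerm p.1 c p.2 q.2 else 0)) := by
      apply List.map_congr_left
      intro q hq
      by_cases h : q.1 = c
      · rw [if_pos ((hmatch q hq).mpr h), if_pos h, h]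
      · rw [if_neg (fun hm => h ((hmatch q hq).mp hm)), if_neg h]
    rw [this]
    have hpull : (sa.map (fun q => if q.1 = c then wcTerm p.1 c p.2 q.2 else 0))
        = (sa.map (fun q => wcTerm p.1 c p.2 1 * (if q.1 = c then q.2 else 0))) := by
      apply List.map_congr_left
      intro q _
      by_cases h : q.1 = c
      · simp only [if_pos h, wcTerm]; ring
      · simp [h]
    rw [hpull, List.sum_map_mul_left]
    simp only [wcTerm]
    ring
  · simp only [hr, if_false]
    have : (sa.map (fun q => if charge_add p.1 q.1 = gamma then wcTerm p.1 q.1 p.2 q.2 else 0))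
         = (sa.map (fun _ => (0 : Int))) := by
      apply List.map_congr_left
      intro q hq
      rw [if_neg]
      intro h
      rcases hp q hq with hlen | hne
      · apply hr
        have := congrArg List.length h
        simp [charge_add, hlen] at this
        omega
      · exact hne h
    simp [this]

-- ===== VERDICT (by name: the statement is the Claim_ definition above) =====
theorem joyce_song_primitive_wc_spec : Claim_equal_joyce_song_primitive_wc := by
  intro gamma sb sa _ hpre
  show joyce_song_primitive_wc gamma sb sa = joyce_song_primitive_wc_alt gamma sb sa
  have hA : joyce_song_primitive_wc gamma sb sa
      = (sb.map (fun p =>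
          (sa.map (fun q => if charge_add p.1 q.1 = gamma then wcTerm p.1 q.1 p.2 q.2 else 0)).sum)).sum := by
    show sb.foldl (fun delta p => sa.foldl
        (fun delta q => if charge_add p.1 q.1 = gamma then delta + wcTerm p.1 q.1 p.2 q.2 else delta)
        delta) 0 = _
    rw [nested_foldl_eq]
    ring
  have hB : joyce_song_primitive_wc_alt gamma sb sa
      = (sb.map (fun p => if p.1.length = gamma.length then
            wcTerm p.1 (List.zipWith (fun a b => a - b) gamma p.1) p.2
              ((sa.map (fun q => if q.1 = (List.zipWith (fun a b => a - b) gamma p.1) then q.2 else 0)).sum)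
          else 0)).sum := by
    show sb.foldl (fun delta p => if p.1.length = gamma.length then
          delta + wcTerm p.1 (List.zipWith (fun a b => a - b) gamma p.1) p.2
            ((sa.foldl (fun d q => d.modify q.1 0 (· + q.2)) PySem.Dict.empty).getD
              (List.zipWith (fun a b => a - b) gamma p.1) 0)
        else delta) 0 = _
    rw [foldl_if_add]
    simp only [zero_add]
    apply congrArg
    apply List.map_congr_left
    intro p _
    by_cases h : p.1.length = gamma.length <;> simp only [h, if_true, if_false]
    rw [getD_foldl_modify_sum]
    simp [PySem.Dict.getD_empty]
  rw [hA, hB]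
  apply congrArg
  apply List.map_congr_left
  intro p hp
  exact inner_sum_eq gamma sa p (hpre p hp)
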